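-- pv_equiv track=rewrite | github.com/inveniosoftware/idutils | idutils/__init__.py | is_isni
-- ===== SOURCE A (Python) =====
-- def _convert_x_to_10(x):
--     """Convert char to int with X being converted to 10."""
--     return int(x) if x != 'X' else 10
--
-- def is_isni(val):
--     """Test if argument is an International Standard Name Identifier."""
--     val = val.replace("-", "").replace(" ", "").upper()
--     if len(val) != 16:
--         return False
--     try:
--         r = 0
--         for x in val[:-1]:
--             r = (r + int(x))*2
--         ck = (12 - r % 11) % 11
--         return ck == _convert_x_to_10(val[-1])
--     except ValueError:
--         return False
-- ===== SOURCE B (Python) =====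
-- _ISNI_WEIGHTS = [pow(2, 15 - i, 11) for i in range(15)]
--
--
-- def is_isni(val):
--     """Test if argument is an International Standard Name Identifier."""
--     val = val.replace("-", "").replace(" ", "").upper()
--     if len(val) != 16:
--         return False
--     body, check = val[:15], val[15]
--     if not all(c.isdigit() for c in body):
--         return False
--     if check != 'X' and not check.isdigit():
--         return False
--     s = sum((ord(c) - 48) * w for c, w in zip(body, _ISNI_WEIGHTS))
--     ck = (12 - s % 11) % 11
--     return ck == (10 if check == 'X' else ord(check) - 48)
-- ===== Notes on version B (the rewrite author's own statement) =====
-- stated objective: alternative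
-- what changed: Replaces A's try/except Horner doubling loop ((r+d)*2 with ValueError control flow) by explicit isdigit validation of the 15-digit body and check character followed by a single weighted sum against a precomputed mod-11 weight table pow(2,15-i,11).
import Mathlib
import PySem

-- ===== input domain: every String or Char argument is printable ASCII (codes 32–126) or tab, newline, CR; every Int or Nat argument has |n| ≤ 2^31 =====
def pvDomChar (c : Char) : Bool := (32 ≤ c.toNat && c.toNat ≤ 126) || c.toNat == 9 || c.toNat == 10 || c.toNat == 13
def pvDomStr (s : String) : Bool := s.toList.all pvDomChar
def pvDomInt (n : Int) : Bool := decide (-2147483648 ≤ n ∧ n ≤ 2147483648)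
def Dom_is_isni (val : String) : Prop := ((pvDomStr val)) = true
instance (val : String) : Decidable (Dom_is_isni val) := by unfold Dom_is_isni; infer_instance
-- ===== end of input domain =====

-- B replaces A's try/except Horner doubling loop by explicit digit validation and a
-- precomputed mod-11 weight table summed in one zip pass (objective: alternative decomposition).

-- ===== PORT A =====
-- `_convert_x_to_10`: int(x) with 'X' -> 10; `none` = ValueError
def pvConvertX (x : Char) : Option Int :=
  if x ≠ 'X' then PySem.Int.ofChars? [x] else some 10

-- one step of A's `r = (r + int(x))*2` loop; `none` = ValueError raised
def pvStepA (r? : Option Int) (x : Char) : Option Int :=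
  match r?, PySem.Int.ofChars? [x] with
  | some r, some d => some ((r + d) * 2)
  | _, _ => none

def is_isni (val : String) : Bool :=
  let cs := PySem.Chars.upper (PySem.Chars.replace (PySem.Chars.replace val.toList ['-'] []) [' '] [])
  if cs.length ≠ 16 then false
  else
    match (PySem.List.slice cs none (some (-1))).foldl pvStepA (some 0) with
    | none => false          -- ValueError caught: return False
    | some r =>
      let ck := PySem.Int.mod (12 - PySem.Int.mod r 11) 11
      match PySem.List.pyGet? cs (-1) with
      | none => false        -- unreachable (length is 16)
      | some last =>
        match pvConvertX last with
        | none => false      -- ValueError caught: return False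
        | some w => decide (ck = w)

-- ===== PORT B =====
-- module constant _ISNI_WEIGHTS = [pow(2, 15 - i, 11) for i in range(15)]
def pvWeights : List Int :=
  (PySem.List.pyRange 0 15 1).map (fun i => PySem.Int.mod ((2 : Int) ^ (15 - i).toNat) 11)

-- ord(c) - 48
def pvDigitVal (c : Char) : Int := (c.toNat : Int) - 48

def is_isni_alt (val : String) : Bool :=
  let cs := PySem.Chars.upper (PySem.Chars.replace (PySem.Chars.replace val.toList ['-'] []) [' '] [])
  if cs.length ≠ 16 then false
  else
    let body := PySem.List.slice cs none (some 15)
    match PySem.List.pyGet? cs (15 : Int) with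
    | none => false          -- unreachable (length is 16)
    | some check =>
      if ¬ (body.all PySem.Chars.isdigit = true) then false
      else if check ≠ 'X' ∧ ¬ (PySem.Chars.isdigit check = true) then false
      else
        let s := (body.zip pvWeights).foldl (fun acc p => acc + pvDigitVal p.1 * p.2) 0
        let ck := PySem.Int.mod (12 - PySem.Int.mod s 11) 11
        decide (ck = if check = 'X' then 10 else pvDigitVal check)

-- ===== PRECONDITION & SPEC =====
def Spec_is_isni (val : String) (out : Bool) : Prop := out = is_isni_alt val
instance (val : String) (out : Bool) : Decidable (Spec_is_isni val out) := by unfold Spec_is_isni; infer_instance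

-- ===== CLAIM (what is proved, stated in full; the proofs are below) =====
def Claim_equal_is_isni : Prop := ∀ (val : String), Dom_is_isni val → Spec_is_isni val (is_isni val)

-- ===== LEMMAS AND PROOFS =====

-- A's accumulator on an all-digit list (proof helper)
def pvHorner (r : Int) : List Char → Int
  | [] => r
  | c :: t => pvHorner ((r + pvDigitVal c) * 2) t

theorem pvOfChars_digit (c : Char) (h : PySem.Chars.isdigit c = true) :
    PySem.Int.ofChars? [c] = some (pvDigitVal c) := by
  simp only [PySem.Chars.isdigit, Bool.and_eq_true, decide_eq_true_eq] at h
  have hb : 48 ≤ c.toNat ∧ c.toNat ≤ 57 := ⟨h.1, h.2⟩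
  have hmem : ∀ n < 58, 48 ≤ n →
      PySem.Int.ofChars? [Char.ofNat n] = some ((n : Int) - 48) := by decide
  have h2 := hmem c.toNat (by omega) hb.1
  rw [Char.ofNat_toNat] at h2
  simpa [pvDigitVal] using h2

theorem pvOfChars_nondigit (c : Char) (hlt : c.toNat < 127)
    (h : PySem.Chars.isdigit c = false) : PySem.Int.ofChars? [c] = none := by
  have hmem : ∀ n < 127, PySem.Chars.isdigit (Char.ofNat n) = false →
      PySem.Int.ofChars? [Char.ofNat n] = none := by decide
  have h2 := hmem c.toNat hlt
  rw [Char.ofNat_toNat] at h2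
  exact h2 h

theorem pvUpperChar_lt (c : Char) (h : c.toNat < 127) :
    (PySem.Chars.upperChar c).toNat < 127 := by
  have key : ∀ n < 127, (PySem.Chars.upperChar (Char.ofNat n)).toNat < 127 := by decide
  have h2 := key c.toNat h
  rwa [Char.ofNat_toNat] at h2

theorem pvMemReplaceGo (old new : List Char) (fuel : Nat) :
    ∀ (l acc : List Char) (c : Char),
    c ∈ PySem.Chars.replace.go old new fuel l acc → c ∈ l ∨ c ∈ acc ∨ c ∈ new := by
  induction fuel with
  | zero =>
    intro l acc c h
    rw [PySem.Chars.replace.go] at h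
    simp at h
    tauto
  | succ n ih =>
    intro l acc c h
    match l with
    | [] =>
      rw [PySem.Chars.replace.go] at h
      simp at h
      all_goals tauto
    | x :: t =>
      rw [PySem.Chars.replace.go] at h
      by_cases hp : old.isPrefixOf (x :: t) = true
      · rw [if_pos hp] at h
        rcases ih _ _ _ h with h1 | h2 | h3
        · exact Or.inl (List.mem_of_mem_drop h1)
        · rcases List.mem_append.1 h2 with h4 | h5
          · exact Or.inr (Or.inr (List.mem_reverse.1 h4))
          · tauto
        · tauto
      · rw [if_neg hp] at h
        rcases ih _ _ _ h with h1 | h2 | h3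
        · exact Or.inl (List.mem_cons_of_mem _ h1)
        · rcases List.mem_cons.1 h2 with h4 | h5
          · exact Or.inl (h4 ▸ List.mem_cons_self)
          · tauto
        · tauto

theorem pvMemReplace (s old new : List Char) (c : Char)
    (h : c ∈ PySem.Chars.replace s old new) : c ∈ s ∨ c ∈ new := by
  rw [PySem.Chars.replace] at h
  by_cases he : old.isEmpty = true
  · rw [if_pos he] at h
    rcases List.mem_append.1 h with h1 | h2
    · exact Or.inr h1
    · rcases List.mem_flatMap.1 h2 with ⟨d, hd, hmem⟩
      rcases List.mem_cons.1 hmem with h3 | h4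
      · exact Or.inl (h3 ▸ hd)
      · exact Or.inr h4
  · rw [if_neg he] at h
    rcases pvMemReplaceGo old new s.length s [] c h with h1 | h2 | h3
    · exact Or.inl h1
    · simp at h2
    · exact Or.inr h3

theorem pvPrepDom (val : String) (h : pvDomStr val = true) :
    ∀ c ∈ PySem.Chars.upper (PySem.Chars.replace (PySem.Chars.replace val.toList ['-'] []) [' '] []),
      c.toNat < 127 := by
  intro c hc
  simp only [PySem.Chars.upper, List.mem_map] at hc
  obtain ⟨d, hd, rfl⟩ := hc
  apply pvUpperChar_lt
  rcases pvMemReplace _ _ _ _ hd with hd2 | hnew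
  · rcases pvMemReplace _ _ _ _ hd2 with hd3 | hnew2
    · simp only [pvDomStr, List.all_eq_true] at h
      have := h d hd3
      simp only [pvDomChar, Bool.or_eq_true, Bool.and_eq_true, decide_eq_true_eq,
        beq_iff_eq] at this
      omega
    · simp at hnew2
  · simp at hnew

theorem pvFoldA_none (l : List Char) : l.foldl pvStepA none = none := by
  induction l with
  | nil => rfl
  | cons c t ih => simpa [pvStepA] using ih

theorem pvFoldA_digit (l : List Char) (h : l.all PySem.Chars.isdigit = true) :
    ∀ r : Int, l.foldl pvStepA (some r) = some (pvHorner r l) := by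
  induction l with
  | nil => intro r; rfl
  | cons c t ih =>
    intro r
    simp only [List.all_cons, Bool.and_eq_true] at h
    simp only [List.foldl_cons, pvStepA, pvOfChars_digit c h.1, pvHorner]
    exact ih h.2 _

theorem pvFoldA_bad (l : List Char) (hdom : ∀ c ∈ l, c.toNat < 127)
    (h : l.all PySem.Chars.isdigit = false) :
    ∀ r? : Option Int, l.foldl pvStepA r? = none := by
  induction l with
  | nil => simp at h
  | cons c t ih =>
    intro r?
    simp only [List.all_cons, Bool.and_eq_false_iff] at h
    rcases h with hc | ht
    · have hnone : PySem.Int.ofChars? [c] = none :=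
        pvOfChars_nondigit c (hdom c List.mem_cons_self) hc
      have : pvStepA r? c = none := by
        cases r? <;> simp [pvStepA, hnone]
      rw [List.foldl_cons, this, pvFoldA_none]
    · rw [List.foldl_cons]
      exact ih (fun d hd => hdom d (List.mem_cons_of_mem _ hd)) ht _

theorem pvMod11 (a : Int) : PySem.Int.mod a 11 = a % 11 := by
  simp [PySem.Int.mod, Int.fmod_eq_emod_of_nonneg a (by norm_num : (0:Int) ≤ 11)]

theorem pvWeights_eq : pvWeights = [10, 5, 8, 4, 2, 1, 6, 3, 7, 9, 10, 5, 8, 4, 2] := by decide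

-- ===== VERDICT =====
set_option maxHeartbeats 1000000 in
theorem is_isni_spec : Claim_equal_is_isni := by
  intro val hdom
  unfold Spec_is_isni
  have hdomcs := pvPrepDom val hdom
  simp only [is_isni, is_isni_alt]
  generalize hg : PySem.Chars.upper (PySem.Chars.replace (PySem.Chars.replace val.toList ['-'] []) [' '] []) = cs at hdomcs ⊢
  by_cases hlen : cs.length = 16
  case neg => simp [hlen]
  case pos =>
    rcases cs with _|⟨c0,_|⟨c1,_|⟨c2,_|⟨c3,_|⟨c4,_|⟨c5,_|⟨c6,_|⟨c7,_|⟨c8,_|⟨c9,_|⟨c10,_|⟨c11,_|⟨c12,_|⟨c13,_|⟨c14,_|⟨c15,_|⟨c16,rest⟩⟩⟩⟩⟩⟩⟩⟩⟩⟩⟩⟩⟩⟩⟩⟩⟩ <;>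
      first
        | (exfalso; revert hlen; simp only [List.length_cons, List.length_nil]; omega)
        | skip
    have hbodydom : ∀ c ∈ [c0,c1,c2,c3,c4,c5,c6,c7,c8,c9,c10,c11,c12,c13,c14], c.toNat < 127 := by
      intro c hc
      apply hdomcs
      simp only [List.mem_cons, List.not_mem_nil, or_false] at hc ⊢
      tauto
    have hs1 : PySem.List.slice [c0,c1,c2,c3,c4,c5,c6,c7,c8,c9,c10,c11,c12,c13,c14,c15] none (some (-1))
        = [c0,c1,c2,c3,c4,c5,c6,c7,c8,c9,c10,c11,c12,c13,c14] := rfl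
    have hs2 : PySem.List.slice [c0,c1,c2,c3,c4,c5,c6,c7,c8,c9,c10,c11,c12,c13,c14,c15] none (some (15:Int))
        = [c0,c1,c2,c3,c4,c5,c6,c7,c8,c9,c10,c11,c12,c13,c14] := rfl
    have hget : PySem.List.pyGet? [c0,c1,c2,c3,c4,c5,c6,c7,c8,c9,c10,c11,c12,c13,c14,c15] (15:Int) = some c15 := rfl
    have hlast : PySem.List.pyGet? [c0,c1,c2,c3,c4,c5,c6,c7,c8,c9,c10,c11,c12,c13,c14,c15] (-1) = some c15 := rfl
    simp only [List.length_cons, List.length_nil, hs1, hs2, hget, hlast]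
    rw [if_neg (by norm_num), if_neg (by norm_num)]
    by_cases hall : ([c0,c1,c2,c3,c4,c5,c6,c7,c8,c9,c10,c11,c12,c13,c14].all PySem.Chars.isdigit) = true
    · rw [pvFoldA_digit _ hall 0]
      rw [if_neg (by simp [hall])]
      by_cases hx : c15 = 'X'
      · subst hx
        rw [if_neg (by simp)]
        have hck : PySem.Int.mod (12 - PySem.Int.mod (pvHorner 0 [c0,c1,c2,c3,c4,c5,c6,c7,c8,c9,c10,c11,c12,c13,c14]) 11) 11
            = PySem.Int.mod (12 - PySem.Int.mod (([c0,c1,c2,c3,c4,c5,c6,c7,c8,c9,c10,c11,c12,c13,c14].zip pvWeights).foldl (fun acc p => acc + pvDigitVal p.1 * p.2) 0) 11) 11 := by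
          simp only [pvWeights_eq, pvHorner, List.zip_cons_cons, List.zip_nil_right,
            List.foldl_cons, List.foldl_nil, pvMod11, pvDigitVal]
          omega
        simp only [pvConvertX, hck]
        norm_num
      · by_cases hdig : PySem.Chars.isdigit c15 = true
        · rw [if_neg (by simp [hdig])]
          have hconv : pvConvertX c15 = some (pvDigitVal c15) := by
            rw [pvConvertX, if_pos hx, pvOfChars_digit c15 hdig]
          have hck : PySem.Int.mod (12 - PySem.Int.mod (pvHorner 0 [c0,c1,c2,c3,c4,c5,c6,c7,c8,c9,c10,c11,c12,c13,c14]) 11) 11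
              = PySem.Int.mod (12 - PySem.Int.mod (([c0,c1,c2,c3,c4,c5,c6,c7,c8,c9,c10,c11,c12,c13,c14].zip pvWeights).foldl (fun acc p => acc + pvDigitVal p.1 * p.2) 0) 11) 11 := by
            simp only [pvWeights_eq, pvHorner, List.zip_cons_cons, List.zip_nil_right,
              List.foldl_cons, List.foldl_nil, pvMod11, pvDigitVal]
            omega
          simp only [hconv, hck, if_neg hx]
        · have hconv : pvConvertX c15 = none := by
            rw [pvConvertX, if_pos hx]
            exact pvOfChars_nondigit c15 (hdomcs c15 (by simp)) (by simpa using hdig)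
          rw [hconv, if_pos ⟨hx, by simpa using hdig⟩]
    · have hallf : ([c0,c1,c2,c3,c4,c5,c6,c7,c8,c9,c10,c11,c12,c13,c14].all PySem.Chars.isdigit) = false := by
        simpa using hall
      rw [pvFoldA_bad _ hbodydom hallf, if_pos (by simp [hallf])]
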